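-- pv_equiv track=rewrite | github.com/miliar/Code_Jam_Webscraper | solutions_python/solutions_year16_round0_nr2/3502.py | minimal_actions
-- ===== SOURCE A (Python) =====
-- def minimal_actions(stack):
--     # Let's first eliminate all + at the bottom of the stack
--     while len(stack) > 0 and stack[-1] == '+':
--         stack = stack[:-1]
--
--     if len(stack) == 0:
--         return 0
--
--     actions = 1
--     before = stack[0]
--     for i in range(1, len(stack)):
--         if stack[i] != before:
--             before = stack[i]
--             actions += 1
--
--     return actions
-- ===== SOURCE B (Python) =====
-- def minimal_actions(stack):
--     # Divide and conquer: the number of consecutive-equal runs of a list is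
--     # runs(left half) + runs(right half), minus one when the split point
--     # falls inside a run (the halves meet on equal elements). The trailing
--     # '+' run that A trims is exactly one run when the last element is '+',
--     # so subtract it from the total at the end.
--     def runs(l):
--         if len(l) <= 1:
--             return len(l)
--         k = len(l) // 2
--         left, right = l[:k], l[k:]
--         return runs(left) + runs(right) - (1 if left[-1] == right[0] else 0)
--     return runs(stack) - (1 if stack and stack[-1] == '+' else 0)
-- ===== Notes on version B (the rewrite author's own statement) =====
-- stated objective: alternative
-- what changed: Replaces A's trim-trailing-'+'-then-linear-scan-for-transitions with a divide-and-conquer run count: recursively split the untrimmed list in half, add the two run counts, subtract one when the halves meet inside a run, and finally subtract the trailing '+' run (if the last element is '+') instead of trimming it.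
import Mathlib
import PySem

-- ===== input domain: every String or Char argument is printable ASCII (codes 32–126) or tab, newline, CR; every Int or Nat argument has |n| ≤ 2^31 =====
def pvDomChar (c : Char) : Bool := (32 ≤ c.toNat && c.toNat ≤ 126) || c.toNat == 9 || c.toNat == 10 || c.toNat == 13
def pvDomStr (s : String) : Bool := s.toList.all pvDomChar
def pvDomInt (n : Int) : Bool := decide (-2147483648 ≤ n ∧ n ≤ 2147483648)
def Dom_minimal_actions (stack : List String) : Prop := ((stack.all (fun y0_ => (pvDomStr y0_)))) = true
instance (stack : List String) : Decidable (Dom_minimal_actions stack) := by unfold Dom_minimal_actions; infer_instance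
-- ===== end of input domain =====

-- B counts runs by divide and conquer on halves instead of A's trim-then-linear-transition-scan; same values everywhere.

-- ===== PORT A =====
-- the 'while len(stack) > 0 and stack[-1] == '+'' loop; stack[:-1] on a nonempty list is dropLast (exact)
def pvTrimA (stack : List String) : List String :=
  if PySem.List.pyGet? stack (-1) = some "+" then pvTrimA stack.dropLast else stack
termination_by stack.length
decreasing_by
  cases stack with
  | nil => simp [PySem.List.pyGet?, PySem.List.pyIdx?] at *
  | cons a l => simp

-- the 'for i in range(1, len(stack))' loop: iterates the elements after the first, carrying (before, actions)
def pvLoopA (before : String) (actions : Int) : List String → Int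
  | [] => actions
  | x :: rest => if x ≠ before then pvLoopA x (actions + 1) rest else pvLoopA before actions rest

def minimal_actions (stack : List String) : Int :=
  match pvTrimA stack with
  | [] => 0
  | h :: t => pvLoopA h 1 t

-- ===== PORT B =====
-- Source B's inner 'runs': split at len//2, recurse on both halves, merge
def pvRunsDC (l : List String) : Int :=
  if l.length ≤ 1 then (l.length : Int)
  else
    let k := l.length / 2
    let left := l.take k
    let right := l.drop k
    pvRunsDC left + pvRunsDC right +
      -(if PySem.List.pyGet? left (-1) = PySem.List.pyGet? right 0 then 1 else 0)
termination_by l.length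
decreasing_by
  · simp only [List.length_take]; omega
  · simp only [List.length_drop]; omega

def minimal_actions_alt (stack : List String) : Int :=
  pvRunsDC stack - (if PySem.List.pyGet? stack (-1) = some "+" then 1 else 0)

-- ===== PRECONDITION & SPEC =====
def Spec_minimal_actions (stack : List String) (out : Int) : Prop := out = minimal_actions_alt stack
instance (stack : List String) (out : Int) : Decidable (Spec_minimal_actions stack out) := by unfold Spec_minimal_actions; infer_instance

-- ===== CLAIM (what is proved, stated in full; the proofs are below) =====
def Claim_equal_minimal_actions : Prop := ∀ (stack : List String), Dom_minimal_actions stack → Spec_minimal_actions stack (minimal_actions stack)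

-- ===== LEMMAS AND PROOFS =====

-- reference run count: number of maximal runs of consecutive equal elements
def pvRuns : List String → Int
  | [] => 0
  | [_] => 1
  | x :: y :: t => (if x ≠ y then 1 else 0) + pvRuns (y :: t)

theorem pvRuns_append (l : List String) (x : String) (t : List String) :
    pvRuns (l ++ x :: t) = pvRuns l + pvRuns (x :: t) - (if l.getLast? = some x then 1 else 0) := by
  induction l with
  | nil => simp [pvRuns]
  | cons a l' ih =>
    cases l' with
    | nil =>
      by_cases h : a = x <;> simp [pvRuns, h]
    | cons b l'' =>
      have := ih
      simp only [List.cons_append] at *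
      rw [pvRuns, this]
      conv_rhs => rw [pvRuns]
      simp only [List.getLast?_cons_cons]
      ring

-- the divide-and-conquer count equals the reference run count
theorem pvRunsDC_eq (l : List String) : pvRunsDC l = pvRuns l := by
  induction l using pvRunsDC.induct with
  | case1 l hle =>
    rw [pvRunsDC, if_pos hle]
    match l, hle with
    | [], _ => simp [pvRuns]
    | [a], _ => simp [pvRuns]
  | case2 l hgt k left right ihL ihR =>
    rw [pvRunsDC, if_neg hgt]
    have hn : 2 ≤ l.length := by omega
    have hk1 : 1 ≤ k := by omega
    have hkn : k < l.length := by omega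
    obtain ⟨x, t, hxt⟩ : ∃ x t, right = x :: t := by
      have : right.length = l.length - k := by simp [right]
      cases hr : right with
      | nil => rw [hr] at this; simp at this; omega
      | cons x t => exact ⟨x, t, rfl⟩
    have hsplit : l = left ++ x :: t := by
      rw [← hxt]; simp [left, right]
    have hget0 : PySem.List.pyGet? right 0 = some x := by
      simp [hxt]
    show pvRunsDC left + pvRunsDC right +
        -(if PySem.List.pyGet? left (-1) = PySem.List.pyGet? right 0 then 1 else 0) = pvRuns l
    rw [ihL, ihR, hget0, PySem.List.pyGet?_neg_one, hxt]
    rw [show pvRuns l = pvRuns (left ++ x :: t) from by rw [← hsplit]]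
    rw [pvRuns_append]
    ring

-- A's counting loop in terms of the reference run count
theorem pvLoopA_eq_runs (l : List String) : ∀ (b : String) (a : Int),
    pvLoopA b a l = a - 1 + pvRuns (b :: l) := by
  induction l with
  | nil => intro b a; simp [pvLoopA, pvRuns]
  | cons x t ih =>
    intro b a
    by_cases h : x = b
    · subst h
      simp only [pvLoopA, ne_eq, not_true_eq_false, if_false, ih]
      simp [pvRuns]
    · simp only [pvLoopA, ne_eq, h, not_false_eq_true, if_true, ih]
      rw [show pvRuns (b :: x :: t) = (if b ≠ x then 1 else 0) + pvRuns (x :: t) from rfl]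
      simp [Ne.symm h]
      ring

theorem pvA_eq_runs_trim (l : List String) : minimal_actions l = pvRuns (pvTrimA l) := by
  rw [minimal_actions]
  cases h : pvTrimA l with
  | nil => simp [pvRuns]
  | cons x t =>
    show pvLoopA x 1 t = pvRuns (x :: t)
    rw [pvLoopA_eq_runs]; ring

-- trimming the trailing '+' run removes exactly one run (or nothing)
theorem pvRuns_trim (l : List String) :
    pvRuns l = pvRuns (pvTrimA l) + (if l.getLast? = some "+" then 1 else 0) := by
  induction l using pvTrimA.induct with
  | case1 s hcond ih =>
    have hlast : s.getLast? = some "+" := by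
      simpa [PySem.List.pyGet?_neg_one] using hcond
    have hne : s ≠ [] := by intro h; simp [h] at hlast
    have hdec : s = s.dropLast ++ ["+"] := by
      conv_lhs => rw [← List.dropLast_append_getLast? _ hlast]
    have happ : pvRuns s = pvRuns s.dropLast + 1 - (if s.dropLast.getLast? = some "+" then 1 else 0) := by
      conv_lhs => rw [hdec]
      rw [pvRuns_append]; simp [pvRuns]
    have htrim : pvTrimA s = pvTrimA s.dropLast := by
      rw [pvTrimA, if_pos hcond]
    rw [happ, ih, htrim, hlast]
    by_cases hb : s.dropLast.getLast? = some "+" <;> simp [hb]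
  | case2 s hcond =>
    have hlast : s.getLast? ≠ some "+" := by
      simpa [PySem.List.pyGet?_neg_one] using hcond
    have htrim : pvTrimA s = s := by rw [pvTrimA, if_neg hcond]
    simp [htrim, hlast]

-- ===== VERDICT (by name: the statement is the Claim_ definition above) =====
theorem minimal_actions_spec : Claim_equal_minimal_actions := by
  intro stack _
  unfold Spec_minimal_actions minimal_actions_alt
  rw [pvRunsDC_eq, pvA_eq_runs_trim, pvRuns_trim stack, PySem.List.pyGet?_neg_one]
  ring
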